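-- pv_equiv track=rewrite | github.com/Cwilli-33/Gmail-to-GHL-Pipeline | src/data_merger.py | _merge_statement_numbers
-- ===== SOURCE A (Python) =====
-- def _merge_statement_numbers(existing: str, new: str) -> str:
--     seen = set()
--     result = []
--     for raw in [new, existing]:
--         if not raw:
--             continue
--         for item in raw.split(","):
--             item = item.strip()
--             if item and item not in seen:
--                 seen.add(item)
--                 result.append(item)
--     return ", ".join(result)
-- ===== SOURCE B (Python) =====
-- def _merge_statement_numbers(existing: str, new: str) -> str:
--     tokens = [t.strip() for raw in (new, existing) for t in raw.split(",")]
--     tokens = [t for t in tokens if t]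
--
--     def first_only(items):
--         if not items:
--             return []
--         head = items[0]
--         return [head] + first_only([t for t in items[1:] if t != head])
--
--     return ", ".join(first_only(tokens))
-- ===== Notes on version B (the rewrite author's own statement) =====
-- stated objective: alternative
-- what changed: Replaces the interleaved seen-set/result single pass by a recursive remove-later-duplicates dedup (keep the head, filter its duplicates out of the tail, recurse) over one flat stripped-token list built without the per-string emptiness guard.
import Mathlib
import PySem

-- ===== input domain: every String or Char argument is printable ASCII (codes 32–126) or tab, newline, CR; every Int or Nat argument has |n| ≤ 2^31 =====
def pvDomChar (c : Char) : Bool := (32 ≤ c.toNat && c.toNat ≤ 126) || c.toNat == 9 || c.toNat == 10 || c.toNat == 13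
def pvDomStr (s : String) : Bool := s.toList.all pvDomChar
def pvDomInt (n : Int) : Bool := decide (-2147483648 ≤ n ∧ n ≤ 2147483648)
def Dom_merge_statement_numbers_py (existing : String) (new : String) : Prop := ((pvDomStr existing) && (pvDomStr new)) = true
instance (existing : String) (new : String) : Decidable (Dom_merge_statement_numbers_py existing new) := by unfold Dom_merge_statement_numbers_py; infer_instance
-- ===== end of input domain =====

-- B replaces A's interleaved seen-set/result loop by a recursive remove-later-duplicates dedup over one flat stripped-token list; return values proved equal.

-- ===== PORT A =====
-- state: (seen : PySem.Set String, result : List String); the nested loops become folds.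
-- 's.split(",")' is PySem.Str.split? with the non-empty separator ",", so '.getD []' is never taken.
def merge_statement_numbers_py (existing : String) (new : String) : String :=
  let st :=
    [new, existing].foldl
      (fun st raw =>
        if raw = "" then st
        else
          ((PySem.Str.split? raw ",").getD []).foldl
            (fun st item0 =>
              let item := PySem.Str.strip item0
              if item ≠ "" then
                if PySem.Set.contains st.1 item then st
                else (PySem.Set.add st.1 item, st.2 ++ [item])
              else st)
            st)
      (PySem.Set.empty, ([] : List String))
  PySem.Str.join ", " st.2

-- ===== PORT B =====
-- first_only(items): keep the head, filter its later duplicates out of the tail, recurse.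
def pvFirstOnly : List String → List String
  | [] => []
  | h :: t => h :: pvFirstOnly (t.filter (fun x => x ≠ h))
termination_by l => l.length
decreasing_by
  simp
  exact (List.length_filter_le _ _).trans (by simp)

-- tokens = [t.strip() for raw in (new, existing) for t in raw.split(",")]; tokens = [t for t in tokens if t]
def merge_statement_numbers_py_alt (existing : String) (new : String) : String :=
  let tokens :=
    ([new, existing].flatMap
      (fun raw => ((PySem.Str.split? raw ",").getD []).map PySem.Str.strip)).filter
      (fun t => t ≠ "")
  PySem.Str.join ", " (pvFirstOnly tokens)

-- ===== PRECONDITION & SPEC =====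
def Spec_merge_statement_numbers_py (existing : String) (new : String) (out : String) : Prop := out = merge_statement_numbers_py_alt existing new
instance (existing : String) (new : String) (out : String) : Decidable (Spec_merge_statement_numbers_py existing new out) := by unfold Spec_merge_statement_numbers_py; infer_instance

-- ===== CLAIM (what is proved, stated in full; the proofs are below) =====
def Claim_equal_merge_statement_numbers_py : Prop := ∀ (existing : String) (new : String), Dom_merge_statement_numbers_py existing new → Spec_merge_statement_numbers_py existing new (merge_statement_numbers_py existing new)

-- ===== LEMMAS AND PROOFS =====

-- named copies of A's two loop bodies (for rewriting)
def pvAInner (st : List String × List String) (item0 : String) : List String × List String :=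
  let item := PySem.Str.strip item0
  if item ≠ "" then
    if PySem.Set.contains st.1 item then st
    else (PySem.Set.add st.1 item, st.2 ++ [item])
  else st

def pvAOuter (st : List String × List String) (raw : String) : List String × List String :=
  if raw = "" then st else ((PySem.Str.split? raw ",").getD []).foldl pvAInner st

-- A's per-string cleaned-token list (filter before strip, as A tests item.strip())
def pvClean (raw : String) : List String :=
  (((PySem.Str.split? raw ",").getD []).filter (fun t => PySem.Str.strip t ≠ "")).map
    PySem.Str.strip

-- A's dedupe step, once the strip/empty test has fired
def pvDStep (st : List String × List String) (item : String) : List String × List String :=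
  if PySem.Set.contains st.1 item then st else (PySem.Set.add st.1 item, st.2 ++ [item])

-- A's inner loop over the raw tokens = the dedupe step folded over the cleaned tokens
theorem pvInner_eq (l : List String) (st : List String × List String) :
    l.foldl pvAInner st
    = ((l.filter (fun t => PySem.Str.strip t ≠ "")).map PySem.Str.strip).foldl pvDStep st := by
  induction l generalizing st with
  | nil => rfl
  | cons a tl ih =>
      by_cases h : PySem.Str.strip a = ""
      · simpa [h, pvAInner] using ih st
      · simpa [h, pvAInner, pvDStep] using ih (pvDStep st (PySem.Str.strip a))

-- the dedupe step keeps the pair (seen, result) diagonal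
theorem pvDiag (l : List String) (s : List String) :
    l.foldl pvDStep (s, s) = (l.foldl PySem.Set.add s, l.foldl PySem.Set.add s) := by
  induction l generalizing s with
  | nil => rfl
  | cons a tl ih =>
      have hstep : pvDStep (s, s) a = (PySem.Set.add s a, PySem.Set.add s a) := by
        unfold pvDStep PySem.Set.add
        split_ifs <;> rfl
      simpa [hstep] using ih (PySem.Set.add s a)

-- the whole of A's loop nest, on a diagonal state, equals Set.add folded over A's flat token list
theorem pvKey (raws : List String) (s : List String) :
    raws.foldl pvAOuter (s, s)
    = (((raws.filter (fun raw => raw ≠ "")).flatMap pvClean).foldl PySem.Set.add s,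
       ((raws.filter (fun raw => raw ≠ "")).flatMap pvClean).foldl PySem.Set.add s) := by
  induction raws generalizing s with
  | nil => rfl
  | cons raw tl ih =>
      rw [List.foldl_cons]
      by_cases h : raw = ""
      · rw [show pvAOuter (s, s) raw = (s, s) from by simp [pvAOuter, h],
          List.filter_cons_of_neg (by simp [h])]
        exact ih s
      · rw [show pvAOuter (s, s) raw
              = ((PySem.Str.split? raw ",").getD []).foldl pvAInner (s, s) from by
            simp [pvAOuter, h],
          pvInner_eq, pvDiag, List.filter_cons_of_pos (by simp [h]), List.flatMap_cons]
        simp only [List.foldl_append]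
        exact ih _

-- ofList commutes with filter
theorem pvOfList_filter (p : String → Bool) (xs : List String) :
    PySem.Set.ofList (xs.filter p) = (PySem.Set.ofList xs).filter p := by
  induction xs with
  | nil => rfl
  | cons a tl ih =>
      by_cases hp : p a = true
      · rw [List.filter_cons_of_pos hp, PySem.Set.ofList_cons, PySem.Set.ofList_cons,
          List.filter_cons_of_pos hp, ih]
        simp [PySem.Set.discard, List.filter_filter, Bool.and_comm]
      · have hp' : p a = false := by
          cases h : p a
          · rfl
          · exact absurd h hp
        rw [List.filter_cons_of_neg (by simp [hp']), PySem.Set.ofList_cons,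
          List.filter_cons_of_neg (by simp [hp']), ih]
        have hpt : ∀ y : String, p y = (p y && !(y == a)) := by
          intro y
          by_cases hya : y = a
          · subst hya; simp [hp']
          · simp [hya]
        rw [PySem.Set.discard, List.filter_filter]
        exact List.filter_congr (fun y _ => hpt y)

-- B's recursion computes exactly the first-occurrence dedup (= PySem.Set.ofList)
theorem pvFirstOnly_eq (l : List String) : pvFirstOnly l = PySem.Set.ofList l := by
  generalize hn : l.length = n
  induction n using Nat.strong_induction_on generalizing l with
  | _ n ih =>
    cases l with
    | nil => rw [pvFirstOnly.eq_1]; rfl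
    | cons h t =>
      rw [pvFirstOnly.eq_2,
        ih (t.filter (fun x => x ≠ h)).length (by
          subst hn
          exact Nat.lt_succ_of_le (List.length_filter_le _ _)) _ rfl,
        pvOfList_filter, PySem.Set.ofList_cons]
      simp only [PySem.Set.discard]
      exact congrArg (h :: ·) (List.filter_congr (fun y _ => by by_cases hy : y = h <;> simp [hy]))

-- per string: A's guard+filter-then-strip tokens = B's strip-then-filter tokens
theorem pvClean_eq (raw : String) :
    (if raw = "" then [] else pvClean raw)
    = (((PySem.Str.split? raw ",").getD []).map PySem.Str.strip).filter (fun t => t ≠ "") := by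
  by_cases h : raw = ""
  · subst h; decide
  · rw [if_neg h]
    unfold pvClean
    rw [List.filter_map]
    rfl

-- the two flat token lists coincide
theorem pvTokens_eq (raws : List String) :
    (raws.filter (fun raw => raw ≠ "")).flatMap pvClean
    = (raws.flatMap (fun raw => ((PySem.Str.split? raw ",").getD []).map PySem.Str.strip)).filter
        (fun t => t ≠ "") := by
  induction raws with
  | nil => rfl
  | cons raw tl ih =>
      rw [List.flatMap_cons, List.filter_append, ← ih, ← pvClean_eq raw]
      by_cases h : raw = ""
      · rw [List.filter_cons_of_neg (by simp [h]), if_pos h, List.nil_append]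
      · rw [List.filter_cons_of_pos (by simp [h]), List.flatMap_cons, if_neg h]

theorem merge_statement_numbers_py_spec : Claim_equal_merge_statement_numbers_py := by
  intro existing new _
  show PySem.Str.join ", " (([new, existing].foldl pvAOuter (([] : List String), ([] : List String))).2)
      = merge_statement_numbers_py_alt existing new
  rw [pvKey]
  show PySem.Str.join ", "
      ((([new, existing].filter (fun raw => raw ≠ "")).flatMap pvClean).foldl PySem.Set.add [])
      = merge_statement_numbers_py_alt existing new
  rw [← PySem.Set.ofList_eq_foldl, pvTokens_eq,
    show merge_statement_numbers_py_alt existing new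
        = PySem.Str.join ", "
            (pvFirstOnly
              (([new, existing].flatMap
                  (fun raw => ((PySem.Str.split? raw ",").getD []).map PySem.Str.strip)).filter
                (fun t => t ≠ ""))) from rfl,
    pvFirstOnly_eq]
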